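-- pv_equiv track=rewrite | github.com/MatkoKekez/Drustveni_izbori_i_preferencijalno_glasanje_Blazevic_Dumic_Kekez | src/ranked_pairs.py | ranked_pairs
-- ===== SOURCE A (Python) =====
-- from itertools import permutations
--
-- def creates_cycle(graph, start, end):
--     stack = [end]
--     visited = set()
--
--     while stack:
--         node = stack.pop()
--         if node == start:
--             return True
--         if node not in visited:
--             visited.add(node)
--             stack.extend(graph.get(node, []))
--
--     return False
--
-- def ranked_pairs(pairwise, candidates):
--     edges = []
--
--     for i, j in permutations(candidates, 2):
--         if pairwise[(i, j)] > pairwise[(j, i)]: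
--             strength = pairwise[(i, j)] - pairwise[(j, i)]
--             edges.append((i, j, strength))
--
--     edges.sort(key=lambda x: -x[2])
--
--     graph = {c: [] for c in candidates}
--
--     for winner, loser, _ in edges:
--         if not creates_cycle(graph, winner, loser):
--             graph[winner].append(loser)
--
--     return graph
-- ===== SOURCE B (Python) =====
-- from itertools import permutations
--
-- def ranked_pairs(pairwise, candidates):
--     # Same edge construction and stable sort as the spec; the per-edge DFS is
--     # replaced by a maintained transitive-reachability map.
--     edges = sorted(
--         ((i, j, pairwise[(i, j)] - pairwise[(j, i)])
--          for i, j in permutations(candidates, 2)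
--          if pairwise[(i, j)] > pairwise[(j, i)]),
--         key=lambda x: -x[2])
--
--     graph = {c: [] for c in candidates}
--     reach = {c: set() for c in candidates}   # reach[u] = nodes reachable from u by >= 1 locked edge
--
--     for winner, loser, _ in edges:
--         if winner in reach[loser]:           # locking would close a cycle
--             continue
--         graph[winner].append(loser)
--         gained = {loser} | reach[loser]
--         for u in reach:
--             if u == winner or winner in reach[u]:
--                 reach[u] |= gained
--     return graph
-- ===== Notes on version B (the rewrite author's own statement) =====
-- stated objective: alternative
-- what changed: The per-edge stack-based DFS cycle test is replaced by a maintained transitive-reachability map (dict of sets) updated incrementally as edges are locked, so each cycle test is a single set-membership check.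
import Mathlib
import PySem

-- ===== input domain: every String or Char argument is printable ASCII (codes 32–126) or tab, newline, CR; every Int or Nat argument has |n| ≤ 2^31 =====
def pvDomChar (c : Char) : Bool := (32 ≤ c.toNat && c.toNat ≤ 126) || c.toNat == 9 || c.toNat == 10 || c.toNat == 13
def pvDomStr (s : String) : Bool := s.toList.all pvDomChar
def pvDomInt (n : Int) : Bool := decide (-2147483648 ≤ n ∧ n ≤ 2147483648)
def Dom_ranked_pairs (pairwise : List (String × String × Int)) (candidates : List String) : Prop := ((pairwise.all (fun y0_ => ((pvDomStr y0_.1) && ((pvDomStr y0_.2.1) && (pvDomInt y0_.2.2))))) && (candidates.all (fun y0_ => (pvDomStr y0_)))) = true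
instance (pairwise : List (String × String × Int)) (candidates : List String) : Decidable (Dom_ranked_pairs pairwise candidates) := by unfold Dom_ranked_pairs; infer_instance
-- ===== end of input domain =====

-- B replaces A's per-edge stack DFS with a maintained transitive-reachability map (alternative data structure; return value only, A mutates nothing observable).

-- ===== PORT A =====
-- pairwise[(i, j)] (first-match association-list lookup; Pre_ guarantees the key is present wherever A reads one)
def pvPwGet (pairwise : List (String × String × Int)) (i j : String) : Int :=
  ((pairwise.find? (fun e => e.1 == i && e.2.1 == j)).map (·.2.2)).getD 0

-- helpers for the termination measure of the DFS while-loop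
def pvWeight (g : PySem.Dict String (List String)) (x : String) : Nat := 1 + (g.getD x []).length

def pvPot (g : PySem.Dict String (List String)) (visited : PySem.Set String) : Nat :=
  ((g.keys.filter (fun x => !(PySem.Set.contains visited x))).map (pvWeight g)).sum

theorem pvPot_mono (g : PySem.Dict String (List String)) (visited : PySem.Set String) (node : String) :
    pvPot g (PySem.Set.add visited node) ≤ pvPot g visited := by
  apply List.Sublist.sum_le_sum _ (fun a _ => Nat.zero_le a)
  apply List.Sublist.map
  apply List.monotone_filter_right
  intro x hx
  simp only [Bool.not_eq_eq_eq_not, Bool.not_true] at *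
  rw [← Bool.not_eq_true] at hx ⊢
  rw [PySem.Set.contains_iff] at hx ⊢
  intro hc; exact hx (by rw [PySem.Set.mem_add]; exact Or.inl hc)

theorem pvPot_aux (visited : PySem.Set String) (node : String) (w : String → Nat)
    (hnv : PySem.Set.contains visited node = false) :
    ∀ (l : List String), node ∈ l →
      ((l.filter (fun x => !(PySem.Set.contains (PySem.Set.add visited node) x))).map w).sum + w node ≤
      ((l.filter (fun x => !(PySem.Set.contains visited x))).map w).sum := by
  intro l hl
  induction l with
  | nil => cases hl
  | cons a t ih =>
    by_cases ha : a = node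
    · subst ha
      have h1 : PySem.Set.contains (PySem.Set.add visited a) a = true := by
        rw [PySem.Set.contains_iff, PySem.Set.mem_add]; exact Or.inr rfl
      simp only [List.filter_cons, h1, hnv, Bool.not_true, Bool.not_false, if_false, if_true,
        Bool.false_eq_true, List.map_cons, List.sum_cons]
      have h2 : ((t.filter (fun x => !(PySem.Set.contains (PySem.Set.add visited a) x))).map w).sum ≤
          ((t.filter (fun x => !(PySem.Set.contains visited x))).map w).sum := by
        apply List.Sublist.sum_le_sum _ (fun b _ => Nat.zero_le b)
        apply List.Sublist.map
        apply List.monotone_filter_right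
        intro x hx
        simp only [Bool.not_eq_true'] at hx ⊢
        rw [← Bool.not_eq_true, PySem.Set.contains_iff] at hx ⊢
        intro hc; exact hx (by rw [PySem.Set.mem_add]; exact Or.inl hc)
      omega
    · have hmem : node ∈ t := by cases hl with
        | head => exact absurd rfl ha
        | tail _ h => exact h
      have hca : PySem.Set.contains (PySem.Set.add visited node) a = PySem.Set.contains visited a := by
        rcases h : PySem.Set.contains visited a with _ | _
        · rw [← Bool.not_eq_true, PySem.Set.contains_iff, PySem.Set.mem_add]
          rw [← Bool.not_eq_true, PySem.Set.contains_iff] at h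
          rintro (h' | h')
          · exact h h'
          · exact ha h'
        · rw [PySem.Set.contains_iff, PySem.Set.mem_add]
          rw [PySem.Set.contains_iff] at h
          exact Or.inl h
      simp only [List.filter_cons, hca]
      rcases h : PySem.Set.contains visited a with _ | _ <;>
        simp only [Bool.not_false, Bool.not_true, if_true, if_false, Bool.false_eq_true,
          List.map_cons, List.sum_cons] <;>
        have := ih hmem <;> omega

theorem pvPot_add_le (g : PySem.Dict String (List String)) (visited : PySem.Set String) (node : String)
    (h1 : PySem.Set.contains visited node = false) (h2 : node ∈ g.keys) :
    pvPot g (PySem.Set.add visited node) + pvWeight g node ≤ pvPot g visited :=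
  pvPot_aux visited node (pvWeight g) h1 g.keys h2

theorem pv_stack_len (stack : List String) (node : String) (h : stack.getLast? = some node) :
    stack.length = stack.dropLast.length + 1 := by
  have hne : stack ≠ [] := by rintro rfl; simp at h
  have hpos : 0 < stack.length := List.length_pos_of_ne_nil hne
  simp [List.length_dropLast]
  omega

-- literal port of creates_cycle's while-loop (stack top = list end, as Python's .pop())
def creates_cycle_loop (g : PySem.Dict String (List String)) (start : String)
    (stack : List String) (visited : PySem.Set String) : Bool :=
  match h : stack.getLast? with
  | none => false
  | some node =>
    if node == start then true
    else if hv : PySem.Set.contains visited node then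
      creates_cycle_loop g start stack.dropLast visited
    else
      creates_cycle_loop g start (stack.dropLast ++ g.getD node []) (PySem.Set.add visited node)
termination_by stack.length + pvPot g visited
decreasing_by
  · have := pv_stack_len stack node h
    omega
  · have hlen := pv_stack_len stack node h
    by_cases hk : node ∈ g.keys
    · have := pvPot_add_le g visited node (by simpa using hv) hk
      have hw : pvWeight g node = 1 + (g.getD node []).length := rfl
      simp only [List.length_append]
      omega
    · have hd : g.getD node [] = [] := by
        apply PySem.Dict.getD_of_not_contains
        rw [← Bool.not_eq_true, PySem.Dict.contains_iff_mem_keys]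
        exact hk
      have := pvPot_mono g visited node
      simp only [List.length_append, hd, List.length_nil]
      omega

def creates_cycle (g : PySem.Dict String (List String)) (start finish : String) : Bool :=
  creates_cycle_loop g start [finish] PySem.Set.empty

def ranked_pairs (pairwise : List (String × String × Int)) (candidates : List String) : List (String × List String) :=
  let edges : List (String × String × Int) :=
    (PySem.List.permutations candidates 2).foldl (fun acc p =>
      match p with
      | [i, j] =>
        if pvPwGet pairwise i j > pvPwGet pairwise j i then
          acc ++ [(i, j, pvPwGet pairwise i j - pvPwGet pairwise j i)]
        else acc
      | _ => acc) []
  let edges := PySem.List.sorted edges (fun x => -x.2.2) false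
  let graph : PySem.Dict String (List String) :=
    candidates.foldl (fun d c => d.insert c []) PySem.Dict.empty
  let graph := edges.foldl (fun gr e =>
      if creates_cycle gr e.1 e.2.1 then gr
      else gr.modify e.1 [] (fun l => l ++ [e.2.1])) graph
  graph.items

-- ===== PORT B =====
-- B's copy of the pairwise[(i, j)] lookup
def pvPwGetB (pairwise : List (String × String × Int)) (i j : String) : Int :=
  ((pairwise.find? (fun e => e.1 == i && e.2.1 == j)).map (·.2.2)).getD 0

def ranked_pairs_alt (pairwise : List (String × String × Int)) (candidates : List String) : List (String × List String) :=
  let edges : List (String × String × Int) :=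
    PySem.List.sorted
      ((PySem.List.permutations candidates 2).filterMap (fun p =>
        match p with
        | [] => none
        | i :: rest =>
          match rest with
          | [] => none
          | j :: rest2 =>
            match rest2 with
            | [] =>
              if pvPwGetB pairwise i j > pvPwGetB pairwise j i then
                some (i, j, pvPwGetB pairwise i j - pvPwGetB pairwise j i)
              else none
            | _ :: _ => none))
      (fun x => -x.2.2) false
  let graph : PySem.Dict String (List String) :=
    candidates.foldl (fun d c => d.insert c []) PySem.Dict.empty
  let reach : PySem.Dict String (PySem.Set String) :=
    candidates.foldl (fun d c => d.insert c PySem.Set.empty) PySem.Dict.empty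
  let res := edges.foldl (fun st e =>
      if PySem.Set.contains (st.2.getD e.2.1 PySem.Set.empty) e.1 then st
      else
        let gained : PySem.Set String :=
          PySem.Set.union (PySem.Set.ofList [e.2.1]) (st.2.getD e.2.1 PySem.Set.empty)
        (st.1.modify e.1 [] (fun l => l ++ [e.2.1]),
         st.2.keys.foldl (fun r u =>
           if u == e.1 || PySem.Set.contains (r.getD u PySem.Set.empty) e.1 then
             r.modify u PySem.Set.empty (fun s => PySem.Set.union s gained)
           else r) st.2))
    (graph, reach)
  res.1.items

-- ===== PRECONDITION & SPEC =====
-- Pre_ excludes exactly the inputs where A raises KeyError: some ordered pair yielded by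
-- permutations(candidates, 2) is missing from pairwise (the diagonal pair (i, i) is yielded
-- only when candidate i occurs at least twice).
def Pre_ranked_pairs (pairwise : List (String × String × Int)) (candidates : List String) : Prop :=
  ∀ i ∈ candidates, ∀ j ∈ candidates, (i ≠ j ∨ 2 ≤ candidates.count i) →
    (pairwise.find? (fun e => e.1 == i && e.2.1 == j)).isSome = true
instance (pairwise : List (String × String × Int)) (candidates : List String) : Decidable (Pre_ranked_pairs pairwise candidates) := by unfold Pre_ranked_pairs; infer_instance

def pvWitness_ranked_pairs : (List (String × String × Int)) × List String :=
  ([("a", "b", 3), ("b", "a", 1)], ["a", "b"])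

def Spec_ranked_pairs (pairwise : List (String × String × Int)) (candidates : List String) (out : List (String × List String)) : Prop := out = ranked_pairs_alt pairwise candidates
instance (pairwise : List (String × String × Int)) (candidates : List String) (out : List (String × List String)) : Decidable (Spec_ranked_pairs pairwise candidates out) := by unfold Spec_ranked_pairs; infer_instance

-- ===== CLAIM (what is proved, stated in full; the proofs are below) =====
def Claim_equal_ranked_pairs : Prop := ∀ (pairwise : List (String × String × Int)) (candidates : List String), Dom_ranked_pairs pairwise candidates → Pre_ranked_pairs pairwise candidates → Spec_ranked_pairs pairwise candidates (ranked_pairs pairwise candidates)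

-- ===== LEMMAS AND PROOFS =====

-- reachability in the locked graph (x reaches y by zero or more edges)
def pvSucc (g : PySem.Dict String (List String)) (x y : String) : Prop := y ∈ g.getD x []

def pvReach (g : PySem.Dict String (List String)) : String → String → Prop :=
  Relation.ReflTransGen (pvSucc g)

theorem pv_no_succ_reach (g : PySem.Dict String (List String)) (x y : String)
    (hx : g.getD x [] = []) (h : pvReach g x y) : y = x := by
  rcases Relation.ReflTransGen.cases_head h with h1 | ⟨c, hc, _⟩
  · exact h1.symm
  · rw [pvSucc, hx] at hc; cases hc

-- the visited set never hides a path to start: some stack element still reaches start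
theorem pv_escape (g : PySem.Dict String (List String)) (start : String)
    (stack : List String) (visited : PySem.Set String)
    (hcl : ∀ v ∈ visited, ∀ y ∈ g.getD v [], y ∈ visited ∨ y ∈ stack)
    (hns : ∀ v ∈ visited, v ≠ start) :
    ∀ n, pvReach g n start → (n ∈ visited ∨ n ∈ stack) →
      ∃ x ∈ stack, pvReach g x start := by
  intro n hr
  induction hr using Relation.ReflTransGen.head_induction_on with
  | refl =>
    rintro (h | h)
    · exact absurd rfl (hns _ h)
    · exact ⟨start, h, Relation.ReflTransGen.refl⟩
  | head hstep htail ih =>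
    rename_i a c
    rintro (h | h)
    · exact ih (hcl a h c hstep)
    · exact ⟨a, h, Relation.ReflTransGen.head hstep htail⟩

theorem pv_cc_loop_iff (g : PySem.Dict String (List String)) (start : String)
    (stack : List String) (visited : PySem.Set String) :
    (∀ v ∈ visited, v ≠ start) →
    (∀ v ∈ visited, ∀ y ∈ g.getD v [], y ∈ visited ∨ y ∈ stack) →
    (creates_cycle_loop g start stack visited = true ↔ ∃ x ∈ stack, pvReach g x start) := by
  fun_induction creates_cycle_loop g start stack visited
  case case1 =>
    rename_i stack visited h
    intro _ _
    rw [List.getLast?_eq_none_iff] at h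
    subst h
    simp
  case case2 =>
    rename_i stack visited node h hbeq
    intro _ _
    obtain ⟨l', hst⟩ := List.getLast?_eq_some_iff.mp h
    rw [beq_iff_eq] at hbeq
    subst hbeq
    simp only [true_iff]
    exact ⟨node, by rw [hst]; exact List.mem_append_right _ (by simp), Relation.ReflTransGen.refl⟩
  case case3 =>
    rename_i stack visited node h hbeq hcont ih
    intro H1 H2
    have hnd : node ∈ visited := (PySem.Set.contains_iff visited node).mp hcont
    obtain ⟨l', hst⟩ := List.getLast?_eq_some_iff.mp h
    have hdl : stack.dropLast = l' := by rw [hst]; simp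
    have H2' : ∀ v ∈ visited, ∀ y ∈ g.getD v [], y ∈ visited ∨ y ∈ stack.dropLast := by
      intro v hv y hy
      rcases H2 v hv y hy with h1 | h1
      · exact Or.inl h1
      · rw [hst] at h1
        rcases List.mem_append.mp h1 with h2 | h2
        · exact Or.inr (by rw [hdl]; exact h2)
        · rw [List.mem_singleton] at h2
          rw [h2]
          exact Or.inl hnd
    rw [ih H1 H2']
    constructor
    · rintro ⟨x, hx, hr⟩
      exact ⟨x, by rw [hst, ← hdl]; exact List.mem_append_left _ hx, hr⟩
    · rintro ⟨x, hx, hr⟩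
      rw [hst] at hx
      rcases List.mem_append.mp hx with h2 | h2
      · exact ⟨x, by rw [hdl]; exact h2, hr⟩
      · rw [List.mem_singleton] at h2
        subst h2
        exact pv_escape g start stack.dropLast visited H2' H1 x hr (Or.inl hnd)
  case case4 =>
    rename_i stack visited node h hbeq hcont ih
    intro H1 H2
    have hns : node ≠ start := by
      intro hx
      exact hbeq (by rw [hx, beq_self_eq_true])
    have hnv : node ∉ visited := fun hx => hcont ((PySem.Set.contains_iff visited node).mpr hx)
    obtain ⟨l', hst⟩ := List.getLast?_eq_some_iff.mp h
    have hdl : stack.dropLast = l' := by rw [hst]; simp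
    have H1' : ∀ v ∈ visited.add node, v ≠ start := by
      intro v hv
      rcases (PySem.Set.mem_add visited node v).mp hv with h1 | h1
      · exact H1 v h1
      · rw [h1]; exact hns
    have H2' : ∀ v ∈ visited.add node, ∀ y ∈ g.getD v [],
        y ∈ visited.add node ∨ y ∈ stack.dropLast ++ g.getD node [] := by
      intro v hv y hy
      rcases (PySem.Set.mem_add visited node v).mp hv with h1 | h1
      · rcases H2 v h1 y hy with h2 | h2
        · exact Or.inl ((PySem.Set.mem_add visited node y).mpr (Or.inl h2))
        · rw [hst] at h2
          rcases List.mem_append.mp h2 with h3 | h3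
          · exact Or.inr (List.mem_append_left _ (by rw [hdl]; exact h3))
          · rw [List.mem_singleton] at h3
            rw [h3]
            exact Or.inl ((PySem.Set.mem_add visited node node).mpr (Or.inr rfl))
      · rw [h1] at hy
        exact Or.inr (List.mem_append_right _ hy)
    rw [ih H1' H2']
    constructor
    · rintro ⟨x, hx, hr⟩
      rcases List.mem_append.mp hx with h1 | h1
      · exact ⟨x, by rw [hst, ← hdl]; exact List.mem_append_left _ h1, hr⟩
      · refine ⟨node, by rw [hst]; exact List.mem_append_right _ (by simp), ?_⟩
        exact Relation.ReflTransGen.head h1 hr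
    · rintro ⟨x, hx, hr⟩
      rw [hst] at hx
      rcases List.mem_append.mp hx with h1 | h1
      · exact ⟨x, List.mem_append_left _ (by rw [hdl]; exact h1), hr⟩
      · rw [List.mem_singleton] at h1
        subst h1
        rcases Relation.ReflTransGen.cases_head hr with h2 | ⟨c, hc, hcr⟩
        · exact (hns h2).elim
        · exact ⟨c, List.mem_append_right _ hc, hcr⟩

theorem pv_cc_iff (g : PySem.Dict String (List String)) (start finish : String) :
    creates_cycle g start finish = true ↔ pvReach g finish start := by
  rw [creates_cycle, pv_cc_loop_iff g start [finish] PySem.Set.empty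
    (by intro v hv; cases hv) (by intro v hv; cases hv)]
  constructor
  · rintro ⟨x, hx, hr⟩
    rw [List.mem_singleton] at hx
    rwa [hx] at hr
  · intro h
    exact ⟨finish, by simp, h⟩

-- adding the edge w → l: new paths factor through it
theorem pv_reach_modify (g : PySem.Dict String (List String)) (w l x y : String) :
    pvReach (g.modify w [] (fun t => t ++ [l])) x y ↔
      pvReach g x y ∨ (pvReach g x w ∧ pvReach g l y) := by
  have hmono : ∀ a b, pvSucc g a b → pvSucc (g.modify w [] (fun t => t ++ [l])) a b := by
    intro a b hab
    rw [pvSucc, PySem.Dict.getD_modify]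
    split
    · rename_i haw
      rw [pvSucc, haw] at hab
      exact List.mem_append_left _ hab
    · exact hab
  have hnew : pvSucc (g.modify w [] (fun t => t ++ [l])) w l := by
    rw [pvSucc, PySem.Dict.getD_modify]
    simp
  constructor
  · intro h
    induction h with
    | refl => exact Or.inl Relation.ReflTransGen.refl
    | tail hxz hstep ih =>
      rename_i z y'
      have hsz := hstep
      rw [pvSucc, PySem.Dict.getD_modify] at hsz
      by_cases hzw : z = w
      · rw [if_pos hzw] at hsz
        have hxw : pvReach g x w := by
          rcases ih with h1 | ⟨h1, _⟩
          · rw [hzw] at h1; exact h1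
          · exact h1
        rcases List.mem_append.mp hsz with hy | hy
        · exact Or.inl (hxw.tail hy)
        · rw [List.mem_singleton] at hy
          rw [hy]
          exact Or.inr ⟨hxw, Relation.ReflTransGen.refl⟩
      · rw [if_neg hzw] at hsz
        rcases ih with h1 | ⟨h1, h2⟩
        · exact Or.inl (h1.tail hsz)
        · exact Or.inr ⟨h1, h2.tail hsz⟩
  · rintro (h | ⟨h1, h2⟩)
    · exact Relation.ReflTransGen.mono hmono h
    · exact ((Relation.ReflTransGen.mono hmono h1).tail hnew).trans
        (Relation.ReflTransGen.mono hmono h2)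

theorem pv_getD_init_const {ν : Type} (v : ν) (l : List String) (d : PySem.Dict String ν)
    (h : ∀ x, d.getD x v = v) : ∀ x, (l.foldl (fun d c => d.insert c v) d).getD x v = v := by
  induction l generalizing d with
  | nil => exact h
  | cons c t ih =>
    intro x
    exact ih (d.insert c v) (fun x => by rw [PySem.Dict.getD_insert]; split <;> simp [h]) x

theorem pv_keys_init {ν : Type} (v : ν) (l : List String) :
    (l.foldl (fun d c => d.insert c v) PySem.Dict.empty).keys = PySem.Set.ofList l := by
  have h := PySem.Dict.keys_foldl_insert l (fun _ _ => v) PySem.Dict.empty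
  rw [h]
  rw [PySem.Dict.keys_empty]
  exact PySem.Set.update_empty l

-- the two edge-list constructions build the same list
theorem pv_edges_eq (pairwise : List (String × String × Int)) :
    ∀ (L : List (List String)) (acc : List (String × String × Int)),
      L.foldl (fun acc p =>
        match p with
        | [i, j] =>
          if pvPwGet pairwise i j > pvPwGet pairwise j i then
            acc ++ [(i, j, pvPwGet pairwise i j - pvPwGet pairwise j i)]
          else acc
        | _ => acc) acc
      = acc ++ L.filterMap (fun p =>
        match p with
        | [] => none
        | i :: rest =>
          match rest with
          | [] => none
          | j :: rest2 =>
            match rest2 with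
            | [] =>
              if pvPwGet pairwise i j > pvPwGet pairwise j i then
                some (i, j, pvPwGet pairwise i j - pvPwGet pairwise j i)
              else none
            | _ :: _ => none) := by
  intro L
  induction L with
  | nil => intro acc; simp
  | cons p t ih =>
    intro acc
    rcases p with _ | ⟨i, _ | ⟨j, _ | ⟨k, q⟩⟩⟩
    · simp [List.foldl_cons, ih]
    · simp [List.foldl_cons, ih]
    · simp only [List.foldl_cons, List.filterMap_cons]
      split <;> simp [ih]
    · simp [List.foldl_cons, ih]

theorem pv_good_edges (pairwise : List (String × String × Int)) (candidates : List String) :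
    ∀ e ∈ PySem.List.sorted
      ((PySem.List.permutations candidates 2).filterMap (fun p =>
        match p with
        | [] => none
        | i :: rest =>
          match rest with
          | [] => none
          | j :: rest2 =>
            match rest2 with
            | [] =>
              if pvPwGet pairwise i j > pvPwGet pairwise j i then
                some (i, j, pvPwGet pairwise i j - pvPwGet pairwise j i)
              else none
            | _ :: _ => none))
      (fun x => -x.2.2) false,
      e.1 ∈ candidates ∧ e.2.1 ∈ candidates ∧ e.1 ≠ e.2.1 := by
  intro e he
  rw [PySem.List.mem_sorted] at he
  rw [List.mem_filterMap] at he
  obtain ⟨p, hp, hf⟩ := he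
  rcases p with _ | ⟨i, _ | ⟨j, _ | ⟨k, q⟩⟩⟩ <;> simp only at hf
  · cases hf
  · cases hf
  · split at hf
    · rename_i hgt
      cases hf
      simp only
      refine ⟨PySem.List.mem_of_mem_of_mem_permutations hp (by simp),
              PySem.List.mem_of_mem_of_mem_permutations hp (by simp), ?_⟩
      intro hij
      rw [hij] at hgt
      exact lt_irrefl _ hgt
    · cases hf
  · cases hf

-- the closure-update fold, characterised pointwise
theorem pv_update_fold (w : String) (gained : PySem.Set String) :
    ∀ (ks : List String) (r reach0 : PySem.Dict String (PySem.Set String)), ks.Nodup →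
      (∀ u ∈ ks, r.getD u PySem.Set.empty = reach0.getD u PySem.Set.empty) →
      ∀ x, (ks.foldl (fun r u =>
          if u == w || PySem.Set.contains (r.getD u PySem.Set.empty) w then
            r.modify u PySem.Set.empty (fun s => PySem.Set.union s gained)
          else r) r).getD x PySem.Set.empty
        = if x ∈ ks ∧ (x = w ∨ w ∈ reach0.getD x PySem.Set.empty)
          then PySem.Set.union (r.getD x PySem.Set.empty) gained
          else r.getD x PySem.Set.empty := by
  intro ks
  induction ks with
  | nil => intro r reach0 _ _ x; simp
  | cons u t ih =>
    intro r reach0 hnd h x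
    have hu : r.getD u PySem.Set.empty = reach0.getD u PySem.Set.empty := h u (by simp)
    simp only [List.foldl_cons]
    set r1 := (if u == w || PySem.Set.contains (r.getD u PySem.Set.empty) w then
        r.modify u PySem.Set.empty (fun s => PySem.Set.union s gained) else r) with hr1
    have hne : ∀ z, z ≠ u → r1.getD z PySem.Set.empty = r.getD z PySem.Set.empty := by
      intro z hz
      rw [hr1]
      split
      · rw [PySem.Dict.getD_modify, if_neg hz]
      · rfl
    have h' : ∀ u' ∈ t, r1.getD u' PySem.Set.empty = reach0.getD u' PySem.Set.empty := by
      intro u' hu'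
      have : u' ≠ u := by rintro rfl; exact (List.nodup_cons.mp hnd).1 hu'
      rw [hne u' this]
      exact h u' (by simp [hu'])
    rw [ih r1 reach0 (List.nodup_cons.mp hnd).2 h' x]
    by_cases hxt : x ∈ t
    · have hxu : x ≠ u := by rintro rfl; exact (List.nodup_cons.mp hnd).1 hxt
      rw [hne x hxu]
      by_cases hc : x = w ∨ w ∈ reach0.getD x PySem.Set.empty
      · rw [if_pos ⟨hxt, hc⟩, if_pos ⟨by simp [hxt], hc⟩]
      · rw [if_neg (by tauto), if_neg (by tauto)]
    · rw [if_neg (by tauto)]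
      by_cases hxu : x = u
      · subst hxu
        have hcond : (x == w || PySem.Set.contains (r.getD x PySem.Set.empty) w) = true ↔
            (x = w ∨ w ∈ reach0.getD x PySem.Set.empty) := by
          rw [Bool.or_eq_true, beq_iff_eq, PySem.Set.contains_iff, hu]
        rw [hr1]
        by_cases hc : x = w ∨ w ∈ reach0.getD x PySem.Set.empty
        · rw [if_pos (hcond.mpr hc), PySem.Dict.getD_modify, if_pos rfl,
            if_pos ⟨by simp, hc⟩]
        · have hcf : ¬ ((x == w || PySem.Set.contains (r.getD x PySem.Set.empty) w) = true) := by
            rw [hcond]; exact hc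
          rw [if_neg hcf, if_neg (by tauto)]
      · rw [hne x hxu, if_neg (by simp only [List.mem_cons]; tauto)]

theorem pv_update_fold_keys (w : String) (gained : PySem.Set String) :
    ∀ (ks : List String) (r : PySem.Dict String (PySem.Set String)), (∀ u ∈ ks, u ∈ r.keys) →
      (ks.foldl (fun r u =>
          if u == w || PySem.Set.contains (r.getD u PySem.Set.empty) w then
            r.modify u PySem.Set.empty (fun s => PySem.Set.union s gained)
          else r) r).keys = r.keys := by
  intro ks
  induction ks with
  | nil => intro r _; rfl
  | cons u t ih =>
    intro r h
    simp only [List.foldl_cons]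
    have hk : (if u == w || PySem.Set.contains (r.getD u PySem.Set.empty) w then
        r.modify u PySem.Set.empty (fun s => PySem.Set.union s gained) else r).keys = r.keys := by
      split
      · rw [PySem.Dict.keys_modify]
        exact PySem.Dict.keys_insert_of_contains _ _
          ((PySem.Dict.contains_iff_mem_keys r u).mpr (h u (by simp)))
      · rfl
    rw [ih _ (fun u' hu' => by rw [hk]; exact h u' (by simp [hu'])), hk]

-- main per-edge invariant: B carries A's graph plus its exact reachability map
theorem pv_fold (cands : List String)
    (edges : List (String × String × Int))
    (hE : ∀ e ∈ edges, e.1 ∈ cands ∧ e.2.1 ∈ cands ∧ e.1 ≠ e.2.1) :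
    ∀ (gA : PySem.Dict String (List String)) (reach : PySem.Dict String (PySem.Set String)),
      gA.keys = PySem.Set.ofList cands → reach.keys = PySem.Set.ofList cands →
      (∀ x y, y ∈ reach.getD x PySem.Set.empty ↔ pvReach gA x y ∧ y ≠ x) →
      (edges.foldl (fun st e =>
        if PySem.Set.contains (st.2.getD e.2.1 PySem.Set.empty) e.1 then st
        else
          let gained : PySem.Set String :=
            PySem.Set.union (PySem.Set.ofList [e.2.1]) (st.2.getD e.2.1 PySem.Set.empty)
          (st.1.modify e.1 [] (fun l => l ++ [e.2.1]),
           st.2.keys.foldl (fun r u =>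
             if u == e.1 || PySem.Set.contains (r.getD u PySem.Set.empty) e.1 then
               r.modify u PySem.Set.empty (fun s => PySem.Set.union s gained)
             else r) st.2)) (gA, reach)).1
      = edges.foldl (fun gr e =>
          if creates_cycle gr e.1 e.2.1 then gr
          else gr.modify e.1 [] (fun l => l ++ [e.2.1])) gA := by
  induction edges with
  | nil => intro gA reach _ _ _; rfl
  | cons e t ih =>
    intro gA reach hkg hkr hinv
    obtain ⟨hw, hl, hwl⟩ := hE e (by simp)
    have hA := pv_cc_iff gA e.1 e.2.1
    have hB : PySem.Set.contains (reach.getD e.2.1 PySem.Set.empty) e.1 = true ↔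
        pvReach gA e.2.1 e.1 := by
      rw [PySem.Set.contains_iff, hinv e.2.1 e.1]
      exact ⟨fun h => h.1, fun h => ⟨h, hwl⟩⟩
    have hnokey : ∀ z, z ∉ cands → gA.getD z [] = [] := by
      intro z hz
      apply PySem.Dict.getD_of_not_contains
      rw [← Bool.not_eq_true, PySem.Dict.contains_iff_mem_keys, hkg, PySem.Set.mem_ofList]
      exact hz
    have hreach_mem : ∀ z, pvReach gA z e.1 → z ∈ cands := by
      intro z hz
      by_contra hzc
      have := pv_no_succ_reach gA z e.1 (hnokey z hzc) hz
      rw [this] at hw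
      exact hzc hw
    by_cases hcc : pvReach gA e.2.1 e.1
    · simp only [List.foldl_cons, hA.mpr hcc, hB.mpr hcc, if_true]
      exact ih (fun e' he' => hE e' (by simp [he'])) gA reach hkg hkr hinv
    · have hA' : ¬ (creates_cycle gA e.1 e.2.1 = true) := fun h => hcc (hA.mp h)
      have hB' : ¬ (PySem.Set.contains (reach.getD e.2.1 PySem.Set.empty) e.1 = true) :=
        fun h => hcc (hB.mp h)
      simp only [List.foldl_cons, if_neg hA', if_neg hB']
      apply ih (fun e' he' => hE e' (by simp [he']))
      · rw [PySem.Dict.keys_modify]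
        rw [PySem.Dict.keys_insert_of_contains _ _
          ((PySem.Dict.contains_iff_mem_keys _ _).mpr (by rw [hkg, PySem.Set.mem_ofList]; exact hw))]
        exact hkg
      · rw [pv_update_fold_keys e.1 _ reach.keys reach (fun u hu => hu)]
        exact hkr
      · intro x y
        rw [pv_update_fold e.1 _ reach.keys reach reach
          (by rw [hkr]; exact PySem.Set.nodup_ofList cands) (fun _ _ => rfl) x]
        have hgain : ∀ z, z ∈ PySem.Set.union (PySem.Set.ofList [e.2.1])
            (reach.getD e.2.1 PySem.Set.empty) ↔ pvReach gA e.2.1 z := by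
          intro z
          rw [PySem.Set.mem_union, PySem.Set.mem_ofList, List.mem_singleton, hinv e.2.1 z]
          constructor
          · rintro (h1 | ⟨h1, _⟩)
            · rw [h1]
              exact Relation.ReflTransGen.refl
            · exact h1
          · intro h1
            by_cases hz : z = e.2.1
            · exact Or.inl hz
            · exact Or.inr ⟨h1, hz⟩
        have hxw_mem : pvReach gA x e.1 →
            (x ∈ reach.keys ∧ (x = e.1 ∨ e.1 ∈ reach.getD x PySem.Set.empty)) := by
          intro hxw
          refine ⟨by rw [hkr, PySem.Set.mem_ofList]; exact hreach_mem x hxw, ?_⟩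
          by_cases hx1 : x = e.1
          · exact Or.inl hx1
          · exact Or.inr ((hinv x e.1).mpr ⟨hxw, fun h => hx1 h.symm⟩)
        rw [pv_reach_modify gA e.1 e.2.1 x y]
        split
        · rename_i hc
          have hxreachw : pvReach gA x e.1 := by
            rcases hc.2 with h1 | h1
            · rw [h1]
              exact Relation.ReflTransGen.refl
            · exact ((hinv x e.1).mp h1).1
          rw [PySem.Set.mem_union, hinv x y, hgain y]
          constructor
          · rintro (⟨h1, h2⟩ | h1)
            · exact ⟨Or.inl h1, h2⟩
            · refine ⟨Or.inr ⟨hxreachw, h1⟩, ?_⟩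
              rintro rfl
              exact hcc (h1.trans hxreachw)
          · rintro ⟨h1 | ⟨_, h1⟩, h2⟩
            · exact Or.inl ⟨h1, h2⟩
            · exact Or.inr h1
        · rename_i hc
          rw [hinv x y]
          constructor
          · rintro ⟨h1, h2⟩
            exact ⟨Or.inl h1, h2⟩
          · rintro ⟨h1 | ⟨h1, _⟩, h2⟩
            · exact ⟨h1, h2⟩
            · exact absurd (hxw_mem h1) hc

-- ===== VERDICT (by name: the statement is the Claim_ definition above) =====
theorem ranked_pairs_spec : Claim_equal_ranked_pairs := by
  unfold Claim_equal_ranked_pairs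
  intro pairwise candidates _ _
  unfold Spec_ranked_pairs
  unfold ranked_pairs ranked_pairs_alt
  dsimp only
  simp only [show pvPwGetB = pvPwGet from rfl]
  rw [pv_edges_eq pairwise (PySem.List.permutations candidates 2) []]
  rw [List.nil_append]
  have hg0 : ∀ x, (candidates.foldl (fun d c => d.insert c ([] : List String))
      PySem.Dict.empty).getD x [] = [] :=
    pv_getD_init_const [] candidates PySem.Dict.empty (fun x => PySem.Dict.getD_empty x [])
  have hr0 : ∀ x, (candidates.foldl (fun d c => d.insert c (PySem.Set.empty : PySem.Set String))
      PySem.Dict.empty).getD x PySem.Set.empty = PySem.Set.empty :=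
    pv_getD_init_const PySem.Set.empty candidates PySem.Dict.empty
      (fun x => PySem.Dict.getD_empty x PySem.Set.empty)
  have h := pv_fold candidates
    (PySem.List.sorted
      ((PySem.List.permutations candidates 2).filterMap (fun p =>
        match p with
        | [] => none
        | i :: rest =>
          match rest with
          | [] => none
          | j :: rest2 =>
            match rest2 with
            | [] =>
              if pvPwGet pairwise i j > pvPwGet pairwise j i then
                some (i, j, pvPwGet pairwise i j - pvPwGet pairwise j i)
              else none
            | _ :: _ => none))
      (fun x => -x.2.2) false)
    (pv_good_edges pairwise candidates)
    (candidates.foldl (fun d c => d.insert c []) PySem.Dict.empty)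
    (candidates.foldl (fun d c => d.insert c PySem.Set.empty) PySem.Dict.empty)
    (pv_keys_init [] candidates)
    (pv_keys_init PySem.Set.empty candidates)
    (by
      intro x y
      rw [hr0 x]
      constructor
      · intro hy; cases hy
      · rintro ⟨h1, h2⟩
        exact absurd (pv_no_succ_reach _ x y (hg0 x) h1) h2)
  rw [h]
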